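-- pv_equiv track=rewrite | github.com/DanyPreisz/DataScience-Henry | M0 - Prep Course/Henry Challenge/checkpoint.py | OrdenarDiccionario
-- ===== SOURCE A (Python) =====
-- def OrdenarDiccionario(diccionario_par, clave, descendente=True):
--     '''
--     Esta función recibe como parámetro un diccionario, cuyas listas de valores tienen el mismo
--     tamaño y sus elementos enésimos están asociados. Y otros dos parámetros que indican
--     la clave por la cual debe ordenarse y si es descendente o ascendente.
--     La función debe devolver el diccionario ordenado, teniendo en cuenta de no perder la
--     relación entre los elementos enésimos.
--     Recibe tres argumentos:
--         diccionario:    Diccionario a ordenar.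
--         clave:          Clave del diccionario recibido, por la cual ordenar.
--         descendente:    Un valor booleano, que al ser verdadero indica ordenamiento ascendente y
--                         descendente si es falso.
--                         Debe tratarse de un parámetro por defecto en True.
--     Si el parámetro diccionario no es un tipo de dato diccionario ó el parámetro clave no
--     se encuentra dentro de las claves del diccionario, debe devolver nulo.
--     Ej:
--         dicc = {'clave1':['c','a','b'],
--                 'clave2':['casa','auto','barco'],
--                 'clave3':[1,2,3]}
--         OrdenarDiccionario(dicc, 'clave1')          debe retornar {'clave1':['a','b','c'],
--                                                                 'clave2':['auto','barco','casa'],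
--                                                                 'clave3':[2,3,1]}
--         OrdenarDiccionario(dicc, 'clave3', False)   debe retornar {'clave1':['b','a','c'],
--                                                                 'clave2':['barco','auto','casa'],
--                                                                 'clave3':[3,2,1]}
--     '''
--     #Tu código aca:
--     if not isinstance(diccionario_par, dict) or clave not in diccionario_par:
--         return None
--
--     indices_ordenados = sorted(range(len(diccionario_par[clave])), key=lambda i: diccionario_par[clave][i], reverse=descendente)
--
--     diccionario_ordenado = {}
--     for key in diccionario_par:
--         diccionario_ordenado[key] = [diccionario_par[key][i] for i in indices_ordenados]
--
--     return diccionario_ordenado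
-- ===== SOURCE B (Python) =====
-- def OrdenarDiccionario(diccionario_par, clave, descendente=True):
--     if not isinstance(diccionario_par, dict) or clave not in diccionario_par:
--         return None
--     claves = list(diccionario_par)
--     pos = claves.index(clave)
--     filas = [[diccionario_par[k][i] for k in claves]
--              for i in range(len(diccionario_par[clave]))]
--     filas = sorted(filas, key=lambda fila: fila[pos], reverse=descendente)
--     return {k: [fila[j] for fila in filas] for j, k in enumerate(claves)}
-- ===== Notes on version B (the rewrite author's own statement) =====
-- stated objective: alternative
-- what changed: B transposes the dict into a list of per-index rows, sorts the rows themselves with a stable sort keyed on the clave column, and scatters the sorted rows back under the keys, instead of A's sorting an index permutation and gathering every list through it.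
import Mathlib
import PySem

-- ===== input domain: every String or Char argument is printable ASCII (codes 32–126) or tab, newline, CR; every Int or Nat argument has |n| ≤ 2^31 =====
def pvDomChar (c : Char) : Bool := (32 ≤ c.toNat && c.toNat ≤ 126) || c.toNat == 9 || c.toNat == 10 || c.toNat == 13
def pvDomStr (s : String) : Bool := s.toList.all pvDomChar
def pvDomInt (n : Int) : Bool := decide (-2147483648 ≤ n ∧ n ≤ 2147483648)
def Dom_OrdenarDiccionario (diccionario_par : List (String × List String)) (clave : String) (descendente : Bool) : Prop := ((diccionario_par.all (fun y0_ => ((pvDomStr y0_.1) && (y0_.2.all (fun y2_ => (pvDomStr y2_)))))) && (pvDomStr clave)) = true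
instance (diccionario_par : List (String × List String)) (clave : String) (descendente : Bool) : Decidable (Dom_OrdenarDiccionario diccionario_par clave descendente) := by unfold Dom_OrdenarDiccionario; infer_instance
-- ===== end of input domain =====

-- B replaces A's sort-an-index-permutation-then-gather scheme by transposing the dict into
-- per-index rows, sorting the rows directly (stable, keyed on the clave column) and
-- scattering them back under the keys; same cost, different decomposition.

-- ===== PORT A =====
-- diccionario_par[clave]
def pvColA (d : List (String × List String)) (clave : String) : List String :=
  ((PySem.Dict.mk d).get? clave).getD []

-- indices_ordenados = sorted(range(len(d[clave])), key=lambda i: d[clave][i], reverse=descendente)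
def pvIndicesA (d : List (String × List String)) (clave : String) (desc : Bool) : List Int :=
  PySem.List.sorted (PySem.List.pyRange 0 ((pvColA d clave).length : Int) 1)
    (fun i => PySem.List.pyGetD (pvColA d clave) i "") desc

def OrdenarDiccionario (diccionario_par : List (String × List String)) (clave : String) (descendente : Bool) : Option (List (String × List String)) :=
  if (PySem.Dict.mk diccionario_par).contains clave = false then none
  else
    -- for key in d: out[key] = [d[key][i] for i in indices_ordenados]
    some ((diccionario_par.foldl (fun acc kv =>
      acc.insert kv.1 ((pvIndicesA diccionario_par clave descendente).map
        (fun i => PySem.List.pyGetD (((PySem.Dict.mk diccionario_par).get? kv.1).getD []) i "")))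
      (PySem.Dict.mk [])).items)

-- ===== PORT B =====
-- claves = list(diccionario_par)
def pvClavesB (d : List (String × List String)) : List String :=
  (PySem.Dict.mk d).keys

-- pos = claves.index(clave)
def pvPosB (d : List (String × List String)) (clave : String) : Int :=
  (((PySem.List.index? (pvClavesB d) clave).getD 0 : Nat) : Int)

-- filas = [[d[k][i] for k in claves] for i in range(len(d[clave]))]
def pvFilasB (d : List (String × List String)) (clave : String) : List (List String) :=
  (PySem.List.pyRange 0 ((((PySem.Dict.mk d).get? clave).getD []).length : Int) 1).map
    (fun i => (pvClavesB d).map (fun k => PySem.List.pyGetD (((PySem.Dict.mk d).get? k).getD []) i ""))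

-- filas = sorted(filas, key=lambda fila: fila[pos], reverse=descendente)
def pvFilasOrdB (d : List (String × List String)) (clave : String) (desc : Bool) : List (List String) :=
  PySem.List.sorted (pvFilasB d clave) (fun fila => PySem.List.pyGetD fila (pvPosB d clave) "") desc

def OrdenarDiccionario_alt (diccionario_par : List (String × List String)) (clave : String) (descendente : Bool) : Option (List (String × List String)) :=
  if (PySem.Dict.mk diccionario_par).contains clave = false then none
  else
    -- {k: [fila[j] for fila in filas] for j, k in enumerate(claves)}
    some (((PySem.List.enumerate (pvClavesB diccionario_par) 0).foldl (fun acc jk =>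
      acc.insert jk.2 ((pvFilasOrdB diccionario_par clave descendente).map
        (fun fila => PySem.List.pyGetD fila jk.1 "")))
      (PySem.Dict.mk [])).items)

-- ===== PRECONDITION & SPEC =====
-- Pre_ excludes exactly the ragged dicts on which Python A raises IndexError: some value list
-- shorter than the list at clave (then d[key][i] is out of range for some sorted index i).
def Pre_OrdenarDiccionario (diccionario_par : List (String × List String)) (clave : String) (descendente : Bool) : Prop :=
  ∀ kv ∈ diccionario_par, (((PySem.Dict.mk diccionario_par).get? clave).getD []).length ≤ kv.2.length
instance (diccionario_par : List (String × List String)) (clave : String) (descendente : Bool) : Decidable (Pre_OrdenarDiccionario diccionario_par clave descendente) := by unfold Pre_OrdenarDiccionario; infer_instance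

def pvWitness_OrdenarDiccionario : (List (String × List String)) × String × Bool :=
  ([("k1", ["c", "a", "b"]), ("k2", ["casa", "auto", "barco"])], "k1", true)

def Spec_OrdenarDiccionario (diccionario_par : List (String × List String)) (clave : String) (descendente : Bool) (out : Option (List (String × List String))) : Prop := out = OrdenarDiccionario_alt diccionario_par clave descendente
instance (diccionario_par : List (String × List String)) (clave : String) (descendente : Bool) (out : Option (List (String × List String))) : Decidable (Spec_OrdenarDiccionario diccionario_par clave descendente out) := by unfold Spec_OrdenarDiccionario; infer_instance

-- ===== CLAIM (what is proved, stated in full; the proofs are below) =====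
def Claim_equal_OrdenarDiccionario : Prop := ∀ (diccionario_par : List (String × List String)) (clave : String) (descendente : Bool), Dom_OrdenarDiccionario diccionario_par clave descendente → Pre_OrdenarDiccionario diccionario_par clave descendente → Spec_OrdenarDiccionario diccionario_par clave descendente (OrdenarDiccionario diccionario_par clave descendente)

-- ===== LEMMAS AND PROOFS =====

theorem pv_insertBy_map {α β : Type} (before : β → β → Bool) (f : α → β) (x : α) (ys : List α) :
    PySem.List.insertBy before (f x) (ys.map f)
      = (PySem.List.insertBy (fun a b => before (f a) (f b)) x ys).map f := by
  induction ys with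
  | nil => simp [PySem.List.insertBy]
  | cons y ys ih =>
    simp only [List.map_cons, PySem.List.insertBy]
    split_ifs <;> simp [ih]

theorem pv_foldl_insertBy_map {α β : Type} (before : β → β → Bool) (f : α → β)
    (xs : List α) (acc : List α) :
    (xs.map f).foldl (fun acc x => PySem.List.insertBy before x acc) (acc.map f)
      = (xs.foldl (fun acc x => PySem.List.insertBy (fun a b => before (f a) (f b)) x acc) acc).map f := by
  induction xs generalizing acc with
  | nil => rfl
  | cons x xs ih =>
    simp only [List.map_cons, List.foldl_cons]
    rw [pv_insertBy_map, ih]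

-- sorted(xs.map f, key, rev) = map f over sorted(xs, key ∘ f, rev) (stability transported through f)
theorem pv_sorted_map {α β κ : Type} [LT κ] [DecidableLT κ] (f : α → β) (xs : List α)
    (key : β → κ) (rev : Bool) :
    PySem.List.sorted (xs.map f) key rev
      = (PySem.List.sorted xs (fun a => key (f a)) rev).map f := by
  cases rev with
  | false =>
    rw [PySem.List.sorted_eq_foldl_insertBy, PySem.List.sorted_eq_foldl_insertBy]
    simpa using pv_foldl_insertBy_map (fun a b => decide (key a < key b)) f xs []
  | true =>
    rw [PySem.List.sorted_rev_eq_foldl_insertBy, PySem.List.sorted_rev_eq_foldl_insertBy]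
    simpa using pv_foldl_insertBy_map (fun a b => decide (key b < key a)) f xs []

-- ===== VERDICT (by name: the statement is the Claim_ definition above) =====
theorem OrdenarDiccionario_spec : Claim_equal_OrdenarDiccionario := by
  intro d clave desc hdom hpre
  unfold Spec_OrdenarDiccionario OrdenarDiccionario OrdenarDiccionario_alt
  by_cases hc : (PySem.Dict.mk d).contains clave = false
  · rw [if_pos hc, if_pos hc]
  · rw [if_neg hc, if_neg hc]
    -- clave is a key of the dict
    have hcc : (PySem.Dict.mk d).contains clave = true := by
      cases h : (PySem.Dict.mk d).contains clave
      · exact absurd h hc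
      · rfl
    have hsome : ((PySem.Dict.mk d).get? clave).isSome := by
      rw [← PySem.Dict.contains_eq_isSome_get?]; exact hcc
    obtain ⟨col, hget⟩ := Option.isSome_iff_exists.mp hsome
    have hmem : clave ∈ pvClavesB d := by
      by_contra hnm
      have hnone := (PySem.Dict.get?_eq_none_iff_not_mem_keys (d := PySem.Dict.mk d) (k := clave)).mpr hnm
      rw [hget] at hnone
      simp at hnone
    obtain ⟨p, hp⟩ : ∃ p, PySem.List.index? (pvClavesB d) clave = some p :=
      Option.isSome_iff_exists.mp ((PySem.List.index?_isSome_iff _ _).mpr hmem)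
    obtain ⟨hplt, hpeq, -⟩ := PySem.List.getElem_of_index?_eq_some hp
    have hpos : pvPosB d clave = ((p : Nat) : Int) := by
      simp only [pvPosB, hp, Option.getD_some]
    -- the cell a natural index selects from a row
    have hcell : ∀ (i : Int) (j : Nat) (hj : j < (pvClavesB d).length),
        PySem.List.pyGetD ((pvClavesB d).map
          (fun k => PySem.List.pyGetD (((PySem.Dict.mk d).get? k).getD []) i "")) (j : Int) ""
        = PySem.List.pyGetD (((PySem.Dict.mk d).get? ((pvClavesB d)[j]'hj)).getD []) i "" := by
      intro i j hj
      rw [PySem.List.pyGetD_natCast]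
      simp [List.getD_eq_getElem?_getD, List.getElem?_map, List.getElem?_eq_getElem hj]
    -- B's sorted rows are A's sorted indices mapped through the row constructor
    have hfilas : pvFilasOrdB d clave desc
        = (pvIndicesA d clave desc).map
            (fun i => (pvClavesB d).map
              (fun k => PySem.List.pyGetD (((PySem.Dict.mk d).get? k).getD []) i "")) := by
      unfold pvFilasOrdB pvFilasB
      rw [pv_sorted_map]
      have hk : (fun a => PySem.List.pyGetD ((pvClavesB d).map
            (fun k => PySem.List.pyGetD (((PySem.Dict.mk d).get? k).getD []) a "")) (pvPosB d clave) "")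
          = (fun i => PySem.List.pyGetD (pvColA d clave) i "") := by
        funext i
        rw [hpos, hcell i p hplt, hpeq]
        rfl
      rw [hk]
      rfl
    congr 1
    -- A's loop over the dict's entries is a loop over its key list
    have hA : d.foldl (fun acc kv => acc.insert kv.1 ((pvIndicesA d clave desc).map
          (fun i => PySem.List.pyGetD (((PySem.Dict.mk d).get? kv.1).getD []) i "")))
        (PySem.Dict.mk [])
      = (pvClavesB d).foldl (fun acc k => acc.insert k ((pvIndicesA d clave desc).map
          (fun i => PySem.List.pyGetD (((PySem.Dict.mk d).get? k).getD []) i "")))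
        (PySem.Dict.mk []) := by
      rw [show pvClavesB d = d.map (fun kv => kv.1) from rfl, List.foldl_map]
    -- B's loop body, rewritten through hfilas and hcell
    have hB : (PySem.List.enumerate (pvClavesB d) 0).foldl (fun acc jk =>
          acc.insert jk.2 ((pvFilasOrdB d clave desc).map (fun fila => PySem.List.pyGetD fila jk.1 "")))
        (PySem.Dict.mk [])
      = (PySem.List.enumerate (pvClavesB d) 0).foldl (fun acc jk =>
          acc.insert jk.2 ((pvIndicesA d clave desc).map
            (fun i => PySem.List.pyGetD (((PySem.Dict.mk d).get? jk.2).getD []) i "")))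
        (PySem.Dict.mk []) := by
      apply PySem.List.foldl_congr_mem
      intro acc jk hjk
      obtain ⟨k, hk, hjkeq⟩ := (PySem.List.mem_enumerate_iff _ _ _).mp hjk
      subst hjkeq
      rw [hfilas, List.map_map]
      congr 1
      apply List.map_congr_left
      intro i _
      show PySem.List.pyGetD ((pvClavesB d).map
          (fun k => PySem.List.pyGetD (((PySem.Dict.mk d).get? k).getD []) i "")) (0 + (k : Int)) ""
        = PySem.List.pyGetD (((PySem.Dict.mk d).get? ((pvClavesB d)[k]'hk)).getD []) i ""
      rw [zero_add]
      exact hcell i k hk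
    rw [hA, hB]
    have hC := List.foldl_map (f := fun jk : Int × String => jk.2)
      (g := fun acc k => PySem.Dict.insert acc k ((pvIndicesA d clave desc).map
          (fun i => PySem.List.pyGetD (((PySem.Dict.mk d).get? k).getD []) i "")))
      (l := PySem.List.enumerate (pvClavesB d) 0) (init := PySem.Dict.mk [])
    rw [PySem.List.map_snd_enumerate] at hC
    exact congrArg PySem.Dict.items hC
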